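-- pv_equiv track=rewrite | github.com/alexguja/data-structures-and-algorithms | src/algorithms/search/depth_first_search.py | dfs
-- ===== SOURCE A (Python) =====
-- def dfs(graph):
--     parent_vertices = {}
--     visited = set()
--
--     for vertex in graph:
--         if vertex not in visited:
--             parent_vertices[vertex] = None
--             dfs_visit(graph, vertex, visited, parent_vertices)
--
--     return parent_vertices
--
-- def dfs_visit(graph, start_vertex, visited, parent_vertices):
--     visited.add(start_vertex)
--     for neighbour in graph[start_vertex]:
--         if neighbour not in visited:
--             parent_vertices[neighbour] = start_vertex
--             dfs_visit(graph, neighbour, visited, parent_vertices)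
-- ===== SOURCE B (Python) =====
-- def dfs(graph):
--     parent_vertices = {}
--     visited = set()
--     for vertex in graph:
--         if vertex not in visited:
--             stack = [(None, vertex)]
--             while stack:
--                 parent, u = stack.pop()
--                 if u in visited:
--                     continue
--                 visited.add(u)
--                 parent_vertices[u] = parent
--                 for n in reversed(graph[u]):
--                     stack.append((u, n))
--     return parent_vertices
-- ===== Notes on version B (the rewrite author's own statement) =====
-- stated objective: idiomatic
-- what changed: dfs_visit's recursion is replaced by an explicit stack of (parent, vertex) frames: neighbours are pushed in reversed order and a vertex is marked visited and assigned its parent when popped, reproducing A's recursive preorder and parent pointers without recursion (no RecursionError on deep graphs).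
import Mathlib
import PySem

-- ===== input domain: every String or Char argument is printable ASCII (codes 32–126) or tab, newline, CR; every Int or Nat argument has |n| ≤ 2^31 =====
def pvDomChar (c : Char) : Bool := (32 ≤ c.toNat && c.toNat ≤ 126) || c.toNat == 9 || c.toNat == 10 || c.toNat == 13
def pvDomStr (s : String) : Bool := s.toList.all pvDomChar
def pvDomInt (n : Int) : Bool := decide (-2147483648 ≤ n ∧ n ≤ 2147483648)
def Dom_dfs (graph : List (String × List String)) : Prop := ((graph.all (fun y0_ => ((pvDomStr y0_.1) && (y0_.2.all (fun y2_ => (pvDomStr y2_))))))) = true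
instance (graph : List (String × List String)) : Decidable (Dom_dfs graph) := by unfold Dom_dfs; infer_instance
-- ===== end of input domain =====

-- B replaces dfs_visit's recursion by an explicit stack of (parent, vertex) frames
-- (mark/assign parent on pop, push neighbours reversed), reproducing A's preorder
-- parent dict iteratively; same asymptotic cost, no recursion.


-- ===== PORT A =====
-- graph[u]: Python raises KeyError when u is not a key; under Pre_dfs every vertex
-- looked up is a key, so the total form getD is exact there.
def dfsAdj (graph : List (String × List String)) (u : String) : List String :=
  (PySem.Dict.ofList graph).getD u []

-- dfs_visit, totalised with fuel (pure plumbing, unreachable with the initial fuel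
-- below): one unit is consumed per neighbour-list step and one per recursive entry.
-- The `min r.1 (f+1)` is a termination cap only: dfsVisit never increases fuel
-- (lemma dfsVisit_fuel_le below), so it always equals r.1.
mutual
def dfsVisit (graph : List (String × List String)) :
    Nat → String → List String → PySem.Dict String (Option String) →
    Nat × List String × PySem.Dict String (Option String)
  | 0, u, visited, parents => (0, PySem.Set.add visited u, parents)
  | f+1, u, visited, parents =>
      dfsVisitList graph f (dfsAdj graph u) u (PySem.Set.add visited u) parents
  termination_by f _ _ _ => (f, 0)
  decreasing_by exact Prod.Lex.left _ _ (Nat.lt_succ_self f)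

def dfsVisitList (graph : List (String × List String)) :
    Nat → List String → String → List String → PySem.Dict String (Option String) →
    Nat × List String × PySem.Dict String (Option String)
  | f, [], _, visited, parents => (f, visited, parents)
  | f, n :: ns, u, visited, parents =>
      if PySem.Set.contains visited n then
        match f with
        | 0 => (0, visited, parents)
        | f+1 => dfsVisitList graph f ns u visited parents
      else
        match f with
        | 0 => (0, visited, parents)
        | 1 => (0, visited, parents)
        | f+2 =>
            let r := dfsVisit graph (f+1) n visited (parents.insert n (some u))
            dfsVisitList graph (min r.1 (f+1)) ns u r.2.1 r.2.2
  termination_by f _ _ _ _ => (f, 1)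
  decreasing_by
    · exact Prod.Lex.left _ _ (Nat.lt_succ_self f)
    · exact Prod.Lex.left _ _ (Nat.lt_succ_self (f+1))
    · exact Prod.Lex.left _ _ (by have := min_le_right r.1 (f+1); omega)
end

-- fuel ample for any run: ≤ 1 per visited vertex + 1 per adjacency-list entry
def dfsFuel (graph : List (String × List String)) : Nat :=
  2 * (graph.length + (graph.map (fun p => p.2.length)).sum)

def dfs (graph : List (String × List String)) : List (String × Option String) :=
  let st := graph.foldl
    (fun (st : List String × PySem.Dict String (Option String)) p =>
      if PySem.Set.contains st.1 p.1 then st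
      else
        let r := dfsVisit graph (dfsFuel graph + 1) p.1 st.1 (st.2.insert p.1 none)
        (r.2.1, r.2.2))
    ([], PySem.Dict.empty)
  st.2.items

-- ===== PORT B =====
def altAdj (graph : List (String × List String)) (u : String) : List String :=
  (PySem.Dict.ofList graph).getD u []

-- the while-loop over the explicit stack (head = top; pushing reversed(graph[u])
-- onto a Python list and popping from its end = prepending graph[u] here),
-- totalised with fuel: one unit per pop, one more per fresh visit.
def dfsLoop (graph : List (String × List String)) :
    Nat → List (Option String × String) → List String → PySem.Dict String (Option String) →
    List String × PySem.Dict String (Option String)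
  | _, [], visited, parents => (visited, parents)
  | 0, _ :: _, visited, parents => (visited, parents)
  | f+1, (p, u) :: rest, visited, parents =>
      if PySem.Set.contains visited u then dfsLoop graph f rest visited parents
      else
        match f with
        | 0 => (visited, parents)
        | f+1 =>
            dfsLoop graph f
              ((altAdj graph u).map (fun n => ((some u : Option String), n)) ++ rest)
              (PySem.Set.add visited u) (parents.insert u p)

def dfs_alt (graph : List (String × List String)) : List (String × Option String) :=
  let st := graph.foldl
    (fun (st : List String × PySem.Dict String (Option String)) p =>
      if PySem.Set.contains st.1 p.1 then st
      else dfsLoop graph (dfsFuel graph + 2) [((none : Option String), p.1)] st.1 st.2)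
    ([], PySem.Dict.empty)
  st.2.items

-- ===== PRECONDITION & SPEC =====
-- Pre_dfs: every listed neighbour is itself a key of the graph — exactly the inputs
-- on which Python A returns (on any other input A raises KeyError in dfs_visit).
def Pre_dfs (graph : List (String × List String)) : Prop :=
  ∀ p ∈ graph, ∀ n ∈ p.2, n ∈ graph.map Prod.fst
instance (graph : List (String × List String)) : Decidable (Pre_dfs graph) := by
  unfold Pre_dfs; infer_instance

def pvWitness_dfs : (List (String × List String)) := [("a", ["b", "a"]), ("b", [])]

def Spec_dfs (graph : List (String × List String)) (out : List (String × Option String)) : Prop := out = dfs_alt graph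
instance (graph : List (String × List String)) (out : List (String × Option String)) : Decidable (Spec_dfs graph out) := by unfold Spec_dfs; infer_instance

-- ===== CLAIM (what is proved, stated in full; the proofs are below) =====
def Claim_equal_dfs : Prop := ∀ (graph : List (String × List String)), Dom_dfs graph → Pre_dfs graph → Spec_dfs graph (dfs graph)

-- ===== LEMMAS AND PROOFS =====

-- the two adjacency helpers compute the same lookup
theorem altAdj_eq (graph : List (String × List String)) : altAdj graph = dfsAdj graph := rfl

-- equation lemmas for the well-founded mutual definitions
theorem dfsVisit_zero (graph : List (String × List String)) (u : String) (vis : List String)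
    (par : PySem.Dict String (Option String)) :
    dfsVisit graph 0 u vis par = (0, PySem.Set.add vis u, par) := by
  rw [dfsVisit.eq_def]

theorem dfsVisit_succ (graph : List (String × List String)) (f : Nat) (u : String)
    (vis : List String) (par : PySem.Dict String (Option String)) :
    dfsVisit graph (f+1) u vis par
      = dfsVisitList graph f (dfsAdj graph u) u (PySem.Set.add vis u) par := by
  rw [dfsVisit.eq_def]

theorem dfsVisitList_nil (graph : List (String × List String)) (f : Nat) (u : String)
    (vis : List String) (par : PySem.Dict String (Option String)) :
    dfsVisitList graph f [] u vis par = (f, vis, par) := by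
  rw [dfsVisitList.eq_def]

theorem dfsVisitList_mem_zero (graph : List (String × List String)) (n : String)
    (ns : List String) (u : String) (vis : List String)
    (par : PySem.Dict String (Option String)) (h : PySem.Set.contains vis n = true) :
    dfsVisitList graph 0 (n :: ns) u vis par = (0, vis, par) := by
  have hm : n ∈ vis := by simpa [PySem.Set.contains] using h
  rw [dfsVisitList.eq_def]; simp [hm]

theorem dfsVisitList_mem_succ (graph : List (String × List String)) (f : Nat) (n : String)
    (ns : List String) (u : String) (vis : List String)
    (par : PySem.Dict String (Option String)) (h : PySem.Set.contains vis n = true) :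
    dfsVisitList graph (f+1) (n :: ns) u vis par = dfsVisitList graph f ns u vis par := by
  have hm : n ∈ vis := by simpa [PySem.Set.contains] using h
  rw [dfsVisitList.eq_def]; simp [hm]

theorem dfsVisitList_new_zero (graph : List (String × List String)) (n : String)
    (ns : List String) (u : String) (vis : List String)
    (par : PySem.Dict String (Option String)) (h : PySem.Set.contains vis n = false) :
    dfsVisitList graph 0 (n :: ns) u vis par = (0, vis, par) := by
  have hm : n ∉ vis := by simpa [PySem.Set.contains] using h
  rw [dfsVisitList.eq_def]; simp [hm]

theorem dfsVisitList_new_one (graph : List (String × List String)) (n : String)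
    (ns : List String) (u : String) (vis : List String)
    (par : PySem.Dict String (Option String)) (h : PySem.Set.contains vis n = false) :
    dfsVisitList graph 1 (n :: ns) u vis par = (0, vis, par) := by
  have hm : n ∉ vis := by simpa [PySem.Set.contains] using h
  rw [dfsVisitList.eq_def]; simp [hm]

theorem dfsVisitList_new (graph : List (String × List String)) (f : Nat) (n : String)
    (ns : List String) (u : String) (vis : List String)
    (par : PySem.Dict String (Option String)) (h : PySem.Set.contains vis n = false) :
    dfsVisitList graph (f+2) (n :: ns) u vis par
      = (fun r => dfsVisitList graph (min r.1 (f+1)) ns u r.2.1 r.2.2)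
          (dfsVisit graph (f+1) n vis (par.insert n (some u))) := by
  have hm : n ∉ vis := by simpa [PySem.Set.contains] using h
  rw [dfsVisitList.eq_def]; simp [hm]

theorem dfsLoop_nil (graph : List (String × List String)) (f : Nat) (vis : List String)
    (par : PySem.Dict String (Option String)) :
    dfsLoop graph f [] vis par = (vis, par) := by
  cases f <;> rw [dfsLoop.eq_def]

theorem dfsLoop_zero (graph : List (String × List String)) (s : List (Option String × String))
    (vis : List String) (par : PySem.Dict String (Option String)) :
    dfsLoop graph 0 s vis par = (vis, par) := by
  cases s <;> rw [dfsLoop.eq_def]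

theorem dfsLoop_mem (graph : List (String × List String)) (f : Nat) (p : Option String)
    (u : String) (rest : List (Option String × String)) (vis : List String)
    (par : PySem.Dict String (Option String)) (h : PySem.Set.contains vis u = true) :
    dfsLoop graph (f+1) ((p, u) :: rest) vis par = dfsLoop graph f rest vis par := by
  have hm : u ∈ vis := by simpa [PySem.Set.contains] using h
  rw [dfsLoop.eq_def]; simp [hm]

theorem dfsLoop_new_one (graph : List (String × List String)) (p : Option String)
    (u : String) (rest : List (Option String × String)) (vis : List String)
    (par : PySem.Dict String (Option String)) (h : PySem.Set.contains vis u = false) :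
    dfsLoop graph 1 ((p, u) :: rest) vis par = (vis, par) := by
  have hm : u ∉ vis := by simpa [PySem.Set.contains] using h
  rw [dfsLoop.eq_def]; simp [hm]

theorem dfsLoop_new (graph : List (String × List String)) (f : Nat) (p : Option String)
    (u : String) (rest : List (Option String × String)) (vis : List String)
    (par : PySem.Dict String (Option String)) (h : PySem.Set.contains vis u = false) :
    dfsLoop graph (f+2) ((p, u) :: rest) vis par
      = dfsLoop graph f
          ((altAdj graph u).map (fun n => ((some u : Option String), n)) ++ rest)
          (PySem.Set.add vis u) (par.insert u p) := by
  have hm : u ∉ vis := by simpa [PySem.Set.contains] using h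
  rw [dfsLoop.eq_def]; simp [hm]

-- fuel never increases through dfsVisit / dfsVisitList
theorem dfs_fuel_le (graph : List (String × List String)) :
    ∀ f, (∀ u visited parents, (dfsVisit graph f u visited parents).1 ≤ f) ∧
         (∀ ns u visited parents, (dfsVisitList graph f ns u visited parents).1 ≤ f) := by
  intro f
  induction f using Nat.strong_induction_on with
  | _ f ih =>
    have hlist : ∀ g < f + 1, ∀ ns u visited parents,
        (dfsVisitList graph g ns u visited parents).1 ≤ g := by
      intro g hg
      match g, hg with
      | g, hg =>
        intro ns u visited parents
        match g, Nat.lt_succ_iff.mp hg with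
        | g, hgf =>
          rcases Nat.lt_or_ge g f with h | h
          · exact (ih g h).2 ns u visited parents
          · -- g = f: unfold one layer
            have hgf' : g = f := le_antisymm hgf h
            subst hgf'
            match ns with
            | [] => simp [dfsVisitList_nil]
            | n :: ns =>
              by_cases hn : PySem.Set.contains visited n = true
              · match g with
                | 0 => simp [dfsVisitList_mem_zero graph n ns u visited parents hn]
                | g+1 =>
                  rw [dfsVisitList_mem_succ graph g n ns u visited parents hn]
                  exact le_trans ((ih g (Nat.lt_succ_self g)).2 ns u visited parents) (Nat.le_succ g)
              · have hn' : PySem.Set.contains visited n = false := by simpa using hn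
                match g with
                | 0 => simp [dfsVisitList_new_zero graph n ns u visited parents hn']
                | 1 => simp [dfsVisitList_new_one graph n ns u visited parents hn']
                | g+2 =>
                  rw [dfsVisitList_new graph g n ns u visited parents hn']
                  have hmin : min (dfsVisit graph (g+1) n visited (parents.insert n (some u))).1 (g+1) ≤ g+1 :=
                    min_le_right _ _
                  exact le_trans (le_trans ((ih _ (by omega)).2 _ _ _ _) hmin) (by omega)
    constructor
    · intro u visited parents
      match f with
      | 0 => simp [dfsVisit_zero]
      | f+1 =>
        rw [dfsVisit_succ]
        exact le_trans (hlist f (by omega) _ _ _ _) (Nat.le_succ f)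
    · exact hlist f (Nat.lt_succ_self f)

theorem dfsVisitList_fuel_le (graph : List (String × List String)) (f : Nat)
    (ns : List String) (u : String) (vis : List String)
    (par : PySem.Dict String (Option String)) :
    (dfsVisitList graph f ns u vis par).1 ≤ f :=
  (dfs_fuel_le graph f).2 ns u vis par

-- the bridge: running the stack loop on the frames for ns (parent u) pushed on top
-- of rest equals running A's neighbour loop on ns first, then the stack loop on rest
theorem dfs_bridge (graph : List (String × List String)) :
    ∀ f ns u rest visited parents,
      dfsLoop graph f (ns.map (fun n => ((some u : Option String), n)) ++ rest) visited parents
        = (fun r => dfsLoop graph r.1 rest r.2.1 r.2.2)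
            (dfsVisitList graph f ns u visited parents) := by
  intro f
  induction f using Nat.strong_induction_on with
  | _ f ih =>
    intro ns u rest visited parents
    match ns with
    | [] => simp [dfsVisitList_nil]
    | n :: ns =>
      simp only [List.map_cons, List.cons_append]
      by_cases hn : PySem.Set.contains visited n = true
      · match f with
        | 0 => simp [dfsLoop_zero, dfsVisitList_mem_zero graph n ns u visited parents hn]
        | f+1 =>
          rw [dfsLoop_mem graph f (some u) n _ visited parents hn,
              dfsVisitList_mem_succ graph f n ns u visited parents hn]
          exact ih f (Nat.lt_succ_self f) ns u rest visited parents
      · have hn' : PySem.Set.contains visited n = false := by simpa using hn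
        match f with
        | 0 => simp [dfsLoop_zero, dfsVisitList_new_zero graph n ns u visited parents hn']
        | 1 =>
          rw [dfsLoop_new_one graph (some u) n _ visited parents hn',
              dfsVisitList_new_one graph n ns u visited parents hn']
          simp [dfsLoop_zero]
        | f+2 =>
          rw [dfsLoop_new graph f (some u) n _ visited parents hn',
              dfsVisitList_new graph f n ns u visited parents hn']
          rw [altAdj_eq]
          set r := dfsVisit graph (f+1) n visited (parents.insert n (some u)) with hr
          have hr1 : r.1 ≤ f := by
            rw [hr, dfsVisit_succ]
            exact dfsVisitList_fuel_le graph f _ _ _ _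
          have h1 := ih f (by omega) (dfsAdj graph n) n
              (ns.map (fun n => ((some u : Option String), n)) ++ rest)
              (PySem.Set.add visited n) (parents.insert n (some u))
          rw [h1]
          simp only [← dfsVisit_succ, ← hr]
          have h2 := ih r.1 (by omega) ns u rest r.2.1 r.2.2
          rw [h2]
          have hmin : min r.1 (f+1) = r.1 := min_eq_left (by omega)
          rw [hmin]

-- per root: the whole stack run from a single frame equals one dfs_visit call
theorem dfs_root (graph : List (String × List String)) (f : Nat) (v : String)
    (vis : List String) (par : PySem.Dict String (Option String))
    (h : PySem.Set.contains vis v = false) :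
    dfsLoop graph (f+2) [((none : Option String), v)] vis par
      = (fun r => (r.2.1, r.2.2)) (dfsVisit graph (f+1) v vis (par.insert v none)) := by
  rw [dfsLoop_new graph f none v [] vis par h, altAdj_eq]
  have hb := dfs_bridge graph f (dfsAdj graph v) v []
      (PySem.Set.add vis v) (par.insert v none)
  rw [hb, dfsVisit_succ]
  simp [dfsLoop_nil]

-- ===== VERDICT (by name: the statement is the Claim_ definition above) =====
theorem dfs_spec : Claim_equal_dfs := by
  intro graph _ _
  unfold Spec_dfs dfs dfs_alt
  have hstep :
      (fun (st : List String × PySem.Dict String (Option String)) (p : String × List String) =>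
        if PySem.Set.contains st.1 p.1 then st
        else
          let r := dfsVisit graph (dfsFuel graph + 1) p.1 st.1 (st.2.insert p.1 none)
          (r.2.1, r.2.2))
      = (fun (st : List String × PySem.Dict String (Option String)) (p : String × List String) =>
        if PySem.Set.contains st.1 p.1 then st
        else dfsLoop graph (dfsFuel graph + 2) [((none : Option String), p.1)] st.1 st.2) := by
    funext st p
    by_cases h : PySem.Set.contains st.1 p.1 = true
    · have hm : p.1 ∈ st.1 := by simpa [PySem.Set.contains] using h
      simp [hm]
    · have h' : PySem.Set.contains st.1 p.1 = false := by simpa using h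
      have hm : p.1 ∉ st.1 := by simpa [PySem.Set.contains] using h'
      simp only [hm, if_neg, if_false]
      rw [dfs_root graph (dfsFuel graph) p.1 st.1 st.2 h']
  rw [hstep]
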